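-- pv_equiv track=rewrite | github.com/vkorenkov-varonis/varonisdsp | varonisdsp_tools.py | convert_level
-- ===== SOURCE A (Python) =====
-- from typing import Any, Dict, List, Optional
--
-- def convert_level(level: str, levels: List[str]) -> List[str]:
--     if level is None:
--         return []
--     result = levels.copy()
--     for lev in levels:
--         if level == lev:
--             break
--         result.remove(lev)
--     return result
-- ===== SOURCE B (Python) =====
-- def convert_level(level, levels):
--     if level is None:
--         return []
--     try:
--         return levels[levels.index(level):]
--     except ValueError:
--         return []
-- ===== Notes on version B (the rewrite author's own statement) =====
-- stated objective: simpler
-- what changed: B locates the first occurrence with list.index and returns one slice, instead of copying the whole list and deleting the prefix element by element with list.remove.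
import Mathlib
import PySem

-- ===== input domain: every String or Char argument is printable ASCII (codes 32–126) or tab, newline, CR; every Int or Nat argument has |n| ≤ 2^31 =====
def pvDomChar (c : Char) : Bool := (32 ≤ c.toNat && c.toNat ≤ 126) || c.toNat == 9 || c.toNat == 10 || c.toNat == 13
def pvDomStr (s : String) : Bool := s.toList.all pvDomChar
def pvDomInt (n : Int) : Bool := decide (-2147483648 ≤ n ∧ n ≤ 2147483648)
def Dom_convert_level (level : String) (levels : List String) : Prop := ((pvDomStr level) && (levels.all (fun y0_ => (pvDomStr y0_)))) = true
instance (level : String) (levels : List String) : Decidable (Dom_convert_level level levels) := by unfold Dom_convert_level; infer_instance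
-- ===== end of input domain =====

-- B replaces A's copy-then-remove prefix deletion with a single index-then-slice; objective: simpler (and asymptotically faster in Python).
-- ===== PORT A =====
-- A: result = levels.copy(); for lev in levels: break on match else result.remove(lev).
-- (the `level is None` guard has no counterpart: a Lean String is never None)
def convertGoA (level : String) : List String → List String → List String
  | [], result => result
  | lev :: rest, result =>
    if level == lev then result
    else convertGoA level rest ((PySem.List.remove? result lev).getD result)
    -- result.remove(lev): lev is always present here (it is result's head), so the
    -- ValueError branch (none) is unreachable; getD keeps the function total.

def convert_level (level : String) (levels : List String) : List String :=
  convertGoA level levels levels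

-- ===== PORT B =====
-- B: levels[levels.index(level):], ValueError -> []
def convert_level_alt (level : String) (levels : List String) : List String :=
  match PySem.List.index? levels level with
  | some i => PySem.List.slice levels (some (i : Int)) none
  | none => []

-- ===== PRECONDITION & SPEC =====
def Spec_convert_level (level : String) (levels : List String) (out : List String) : Prop := out = convert_level_alt level levels
instance (level : String) (levels : List String) (out : List String) : Decidable (Spec_convert_level level levels out) := by unfold Spec_convert_level; infer_instance

-- ===== CLAIM (what is proved, stated in full; the proofs are below) =====
def Claim_equal_convert_level : Prop := ∀ (level : String) (levels : List String), Dom_convert_level level levels → Spec_convert_level level levels (convert_level level levels)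

-- ===== LEMMAS AND PROOFS =====
theorem alt_eq_drop (level : String) (xs : List String) :
    convert_level_alt level xs =
      match List.idxOf? level xs with
      | some i => xs.drop i
      | none => [] := by
  unfold convert_level_alt
  rw [PySem.List.index?_eq_idxOf?]
  cases List.idxOf? level xs with
  | none => rfl
  | some i => simp [PySem.List.slice_from_natCast]

theorem goA_eq (level : String) (xs : List String) :
    convertGoA level xs xs = convert_level_alt level xs := by
  induction xs with
  | nil => simp [convertGoA, alt_eq_drop]
  | cons x xs ih =>
    rw [alt_eq_drop]
    by_cases h : level = x
    · subst h
      simp [convertGoA, List.idxOf?_cons]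
    · have hbeq : (level == x) = false := by simp [h]
      have hbeq' : (x == level) = false := by exact beq_eq_false_iff_ne.mpr (fun hx => h hx.symm)
      simp only [convertGoA, hbeq, Bool.false_eq_true, if_false,
                 PySem.List.remove?_cons_self, Option.getD_some]
      rw [ih, alt_eq_drop]
      simp only [List.idxOf?_cons, hbeq', Bool.false_eq_true, if_false]
      cases List.idxOf? level xs with
      | none => rfl
      | some i => rfl

-- ===== VERDICT (by name: the statement is the Claim_ definition above) =====
theorem convert_level_spec : Claim_equal_convert_level := by
  intro level levels _
  unfold Spec_convert_level convert_level
  exact goA_eq level levels
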